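-- pv_equiv track=rewrite | github.com/phongp3j/Python-PTIT | LietKeSoDep.py | thuannghich
-- ===== SOURCE A (Python) =====
-- def thuannghich(n):
--     s = str(n)
--     if len(s)%2 != 0:
--         return False
--     for i in range(len(s)//2):
--         if s[i] != s[len(s)-i-1] or int(s[i])%2!=0 or int(s[len(s)-1-i])%2!=0:
--             return False
--     return True
-- ===== SOURCE B (Python) =====
-- def thuannghich(n):
--     s = str(n)
--     return len(s) % 2 == 0 and s == s[::-1] and all(int(c) % 2 == 0 for c in s)
-- ===== Notes on version B (the rewrite author's own statement) =====
-- stated objective: simpler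
-- what changed: Replaced A's single interleaved half-length index loop (mirror comparison plus two parity tests per index, with early return) by a one-line conjunction of three independent whole-string checks: even length, full-string reversal palindrome test, and an all() pass over the digits' parities.
import Mathlib
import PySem

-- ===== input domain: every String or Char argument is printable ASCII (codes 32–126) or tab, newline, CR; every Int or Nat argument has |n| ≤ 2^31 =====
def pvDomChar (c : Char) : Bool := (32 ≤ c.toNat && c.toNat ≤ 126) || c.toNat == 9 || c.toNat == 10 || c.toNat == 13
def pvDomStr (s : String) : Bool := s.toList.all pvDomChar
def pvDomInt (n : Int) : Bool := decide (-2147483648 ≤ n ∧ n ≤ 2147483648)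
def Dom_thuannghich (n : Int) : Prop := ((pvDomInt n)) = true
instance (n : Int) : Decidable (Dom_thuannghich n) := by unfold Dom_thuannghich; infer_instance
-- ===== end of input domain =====

-- B replaces A's single interleaved half-length index loop by three independent whole-string
-- checks (even length, s == s[::-1], all digits even); objective: simpler. Same cost, same values.

-- int(c) for a one-character string c; in both programs it is only reached on digit
-- characters (the palindrome comparison fails first on '-'), where ofStr? is some.
def pvIntC (c : Char) : Int := (PySem.Int.ofStr? (String.ofList [c])).getD 0

-- ===== PORT A =====
-- the for-loop of A with early return, over the index list range(len(s)//2)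
def aLoop (cs : List Char) : List Nat → Bool
  | [] => true
  | i :: rest =>
      if cs.getD i ' ' ≠ cs.getD (cs.length - i - 1) ' '
          ∨ pvIntC (cs.getD i ' ') % 2 ≠ 0
          ∨ pvIntC (cs.getD (cs.length - 1 - i) ' ') % 2 ≠ 0
      then false
      else aLoop cs rest

def thuannghich (n : Int) : Bool :=
  let s := (PySem.Int.toStr n).toList    -- s = str(n); indexing is exact: every i used is in range
  if s.length % 2 ≠ 0 then false
  else aLoop s (List.range (s.length / 2))

-- ===== PORT B =====
def thuannghich_alt (n : Int) : Bool :=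
  let s := (PySem.Int.toStr n).toList    -- s = str(n)
  decide (s.length % 2 = 0) && (s == s.reverse) && s.all (fun c => pvIntC c % 2 == 0)

-- ===== PRECONDITION & SPEC =====
def Spec_thuannghich (n : Int) (out : Bool) : Prop := out = thuannghich_alt n
instance (n : Int) (out : Bool) : Decidable (Spec_thuannghich n out) := by unfold Spec_thuannghich; infer_instance

-- ===== CLAIM (what is proved, stated in full; the proofs are below) =====
def Claim_equal_thuannghich : Prop := ∀ (n : Int), Dom_thuannghich n → Spec_thuannghich n (thuannghich n)

-- ===== LEMMAS AND PROOFS =====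

-- A's loop returns true iff every listed index passes the three checks
lemma aLoop_all (cs : List Char) (idxs : List Nat) :
    aLoop cs idxs = true ↔
      ∀ i ∈ idxs, cs.getD i ' ' = cs.getD (cs.length - i - 1) ' '
        ∧ pvIntC (cs.getD i ' ') % 2 = 0
        ∧ pvIntC (cs.getD (cs.length - 1 - i) ' ') % 2 = 0 := by
  induction idxs with
  | nil => simp [aLoop]
  | cons i rest ih =>
      simp only [aLoop]
      split_ifs with h
      · simp only [List.mem_cons, false_iff]
        intro hall
        rcases hall i (Or.inl rfl) with ⟨h1, h2, h3⟩
        rcases h with h | h | h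
        · exact h h1
        · exact h h2
        · exact h h3
      · push Not at h
        simp only [ih, List.mem_cons]
        constructor
        · rintro hr j (rfl | hj)
          · exact ⟨h.1, h.2.1, h.2.2⟩
          · exact hr j hj
        · intro hall j hj; exact hall j (Or.inr hj)

-- half-range checks ↔ palindrome plus all digits even, for even length
lemma half_iff (cs : List Char) (hL : cs.length % 2 = 0) :
    (∀ i ∈ List.range (cs.length / 2),
        cs.getD i ' ' = cs.getD (cs.length - i - 1) ' '
          ∧ pvIntC (cs.getD i ' ') % 2 = 0
          ∧ pvIntC (cs.getD (cs.length - 1 - i) ' ') % 2 = 0)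
      ↔ (cs = cs.reverse ∧ ∀ c ∈ cs, pvIntC c % 2 = 0) := by
  simp only [List.mem_range]
  constructor
  · intro h
    have hg : ∀ k, k < cs.length → cs.getD k ' ' = cs.getD (cs.length - 1 - k) ' '
        ∧ pvIntC (cs.getD k ' ') % 2 = 0 := by
      intro k hk
      by_cases hk2 : k < cs.length / 2
      · rcases h k hk2 with ⟨h1, h2, _⟩
        exact ⟨by rw [h1]; congr 1; omega, h2⟩
      · have hj : cs.length - 1 - k < cs.length / 2 := by omega
        rcases h _ hj with ⟨h1, _, h3⟩
        have hkk : cs.length - 1 - (cs.length - 1 - k) = k := by omega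
        have hkk2 : cs.length - (cs.length - 1 - k) - 1 = k := by omega
        rw [hkk2] at h1
        rw [hkk] at h3
        exact ⟨h1.symm, h3⟩
    constructor
    · apply List.ext_getElem (by simp)
      intro i h1 h2
      have := (hg i h1).1
      simp only [List.getD_eq_getElem?_getD] at this
      rw [List.getElem_reverse]
      have hi' : cs.length - 1 - i < cs.length := by omega
      simpa [List.getElem?_eq_getElem, h1, hi'] using this
    · intro c hc
      rcases List.mem_iff_getElem.mp hc with ⟨k, hk, rfl⟩
      have := (hg k hk).2
      simpa [List.getD_eq_getElem?_getD, List.getElem?_eq_getElem, hk] using this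
  · rintro ⟨hpal, hev⟩ i hi
    have hiL : i < cs.length := by omega
    have hjL : cs.length - 1 - i < cs.length := by omega
    have hrev : ∀ k, (hk : k < cs.length) → cs.getD k ' ' = cs.getD (cs.length - 1 - k) ' ' := by
      intro k hk
      conv_lhs => rw [hpal]
      have hk' : k < cs.reverse.length := by simpa using hk
      simp only [List.getD_eq_getElem?_getD, List.getElem?_eq_getElem, hk',
        List.getElem?_eq_getElem, (by omega : cs.length - 1 - k < cs.length)]
      simp [List.getElem_reverse]
    have he : ∀ k, (hk : k < cs.length) → pvIntC (cs.getD k ' ') % 2 = 0 := by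
      intro k hk
      have := hev cs[k] (List.getElem_mem hk)
      simpa [List.getD_eq_getElem?_getD, List.getElem?_eq_getElem, hk] using this
    refine ⟨?_, he i hiL, he _ hjL⟩
    rw [show cs.length - i - 1 = cs.length - 1 - i from by omega]
    exact hrev i hiL

lemma main_eq (cs : List Char) :
    (if cs.length % 2 ≠ 0 then false else aLoop cs (List.range (cs.length / 2)))
      = (decide (cs.length % 2 = 0) && (cs == cs.reverse) && cs.all (fun c => pvIntC c % 2 == 0)) := by
  by_cases hL : cs.length % 2 = 0
  · rw [if_neg (show ¬ cs.length % 2 ≠ 0 from by omega), Bool.eq_iff_iff,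
      aLoop_all, half_iff cs hL]
    simp [hL, List.all_eq_true]
  · simp [hL]

-- ===== VERDICT (by name: the statement is the Claim_ definition above) =====
theorem thuannghich_spec : Claim_equal_thuannghich := by
  intro n _
  unfold Spec_thuannghich thuannghich thuannghich_alt
  exact main_eq _
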